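-- pv_equiv track=rewrite | github.com/broadercrane22/EP-2-dessoft | Funcoes.py | calcula_pontos_regra_simples
-- ===== SOURCE A (Python) =====
-- def calcula_pontos_regra_simples(faces):
--     face = 1
--     resultado = {}
--     while face <= 6:
--         quant = 0
--         for valor in faces:
--             if valor == face:
--                 quant += 1
--         resultado[face] = quant*face
--         face += 1
--     return resultado
-- ===== SOURCE B (Python) =====
-- def calcula_pontos_regra_simples(faces):
--     counts = {}
--     for v in faces:
--         counts[v] = counts.get(v, 0) + 1
--     return {face: counts.get(face, 0) * face for face in range(1, 7)}
-- ===== Notes on version B (the rewrite author's own statement) =====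
-- stated objective: alternative
-- what changed: One counting pass into a dict replaces A's six full re-scans of the faces list; a fixed 1..6 output pass then reads each count by lookup.
import Mathlib
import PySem

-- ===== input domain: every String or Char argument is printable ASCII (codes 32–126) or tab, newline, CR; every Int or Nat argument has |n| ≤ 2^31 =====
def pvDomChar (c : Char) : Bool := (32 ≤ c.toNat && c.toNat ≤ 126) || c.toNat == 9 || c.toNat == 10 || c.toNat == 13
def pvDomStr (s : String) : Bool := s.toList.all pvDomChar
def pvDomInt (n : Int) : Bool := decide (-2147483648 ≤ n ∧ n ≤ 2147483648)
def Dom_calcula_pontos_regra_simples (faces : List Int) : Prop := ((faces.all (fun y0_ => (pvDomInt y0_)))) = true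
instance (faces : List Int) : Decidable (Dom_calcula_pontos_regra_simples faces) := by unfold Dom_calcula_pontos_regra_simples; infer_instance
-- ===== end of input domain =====

-- B replaces A's six full re-scans of `faces` by one counting pass into a dict plus a fixed 1..6 output pass.

-- ===== PORT A =====
def calcula_pontos_regra_simples (faces : List Int) : List (Int × Int) :=
  -- while face <= 6: count faces equal to face, resultado[face] = quant*face
  ((PySem.List.pyRange 1 7 1).foldl
    (fun (resultado : PySem.Dict Int Int) face =>
      let quant := faces.foldl (fun quant valor => if valor == face then quant + 1 else quant) (0 : Int)
      resultado.insert face (quant * face))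
    PySem.Dict.empty).items

-- ===== PORT B =====
def calcula_pontos_regra_simples_alt (faces : List Int) : List (Int × Int) :=
  let counts : PySem.Dict Int Int :=
    faces.foldl (fun d v => d.insert v (d.getD v 0 + 1)) PySem.Dict.empty
  (((PySem.List.pyRange 1 7 1).foldl
      (fun (d : PySem.Dict Int Int) face => d.insert face (counts.getD face 0 * face))
      PySem.Dict.empty)).items

-- ===== PRECONDITION & SPEC =====
def Spec_calcula_pontos_regra_simples (faces : List Int) (out : List (Int × Int)) : Prop := out = calcula_pontos_regra_simples_alt faces
instance (faces : List Int) (out : List (Int × Int)) : Decidable (Spec_calcula_pontos_regra_simples faces out) := by unfold Spec_calcula_pontos_regra_simples; infer_instance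

-- ===== CLAIM (what is proved, stated in full; the proofs are below) =====
def Claim_equal_calcula_pontos_regra_simples : Prop := ∀ (faces : List Int), Dom_calcula_pontos_regra_simples faces → Spec_calcula_pontos_regra_simples faces (calcula_pontos_regra_simples faces)

-- ===== LEMMAS AND PROOFS =====

-- A's inner counting loop counts occurrences of `f`.
theorem countA_eq (faces : List Int) (f : Int) :
    faces.foldl (fun quant valor => if valor == f then quant + 1 else quant) (0 : Int)
      = (faces.count f : Int) := by
  simpa using PySem.List.foldl_count_if (fun valor => valor == f) faces 0

-- B's counting dict reads back as List.count.
theorem countB_eq (faces : List Int) (f : Int) :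
    (faces.foldl (fun (d : PySem.Dict Int Int) v => d.insert v (d.getD v 0 + 1)) PySem.Dict.empty).getD f 0
      = (faces.count f : Int) := by
  simpa using PySem.Dict.getD_foldl_insert_add_one (l := faces) (d := PySem.Dict.empty) (v := f)

-- ===== VERDICT (by name: the statement is the Claim_ definition above) =====
theorem calcula_pontos_regra_simples_spec : Claim_equal_calcula_pontos_regra_simples := by
  intro faces _
  unfold Spec_calcula_pontos_regra_simples calcula_pontos_regra_simples calcula_pontos_regra_simples_alt
  have hA := PySem.Dict.items_foldl_insert_fresh (PySem.List.pyRange 1 7 1)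
      (fun (face : Int) => face)
      (fun face => faces.foldl (fun quant valor => if valor == face then quant + 1 else quant) (0 : Int) * face)
      PySem.Dict.empty (fun a _ => PySem.Dict.contains_empty a) (by decide)
  have hB := PySem.Dict.items_foldl_insert_fresh (PySem.List.pyRange 1 7 1)
      (fun (face : Int) => face)
      (fun face => (faces.foldl (fun (d : PySem.Dict Int Int) v => d.insert v (d.getD v 0 + 1)) PySem.Dict.empty).getD face 0 * face)
      PySem.Dict.empty (fun a _ => PySem.Dict.contains_empty a) (by decide)
  refine (hA.trans ?_).trans hB.symm
  refine congrArg (PySem.Dict.empty.items ++ ·) ?_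
  refine List.map_congr_left (fun f _ => ?_)
  simp only [countA_eq, countB_eq]
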